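-- pv_equiv track=rewrite | github.com/cstuartroe/misc | Python/ShuffleSim/main.py | regular_pile_shuffle
-- ===== SOURCE A (Python) =====
-- def regular_pile_shuffle(deck: list[int], num_piles: int = 6):
--     piles = []
--     for _ in range(num_piles):
--         piles.append([])
--     for i, card in enumerate(deck):
--         piles[i % num_piles].append(card)
--     out = []
--     for pile in piles:
--         out += pile
--     return out
-- ===== SOURCE B (Python) =====
-- def regular_pile_shuffle(deck: list[int], num_piles: int = 6):
--     # Gather each pile directly as a strided walk over the deck, instead of
--     # dealing card-by-card into per-pile lists and concatenating them.
--     out = []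
--     for j in range(num_piles):
--         i = j
--         while i < len(deck):
--             out.append(deck[i])
--             i += num_piles
--     return out
-- ===== Notes on version B (the rewrite author's own statement) =====
-- stated objective: idiomatic
-- what changed: B replaces A's deal-into-piles-then-concatenate (one distributing pass with index mod num_piles into per-pile lists, then a concatenation pass) by gathering each pile directly with a strided index walk over the deck, appending straight to the output.
import Mathlib
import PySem

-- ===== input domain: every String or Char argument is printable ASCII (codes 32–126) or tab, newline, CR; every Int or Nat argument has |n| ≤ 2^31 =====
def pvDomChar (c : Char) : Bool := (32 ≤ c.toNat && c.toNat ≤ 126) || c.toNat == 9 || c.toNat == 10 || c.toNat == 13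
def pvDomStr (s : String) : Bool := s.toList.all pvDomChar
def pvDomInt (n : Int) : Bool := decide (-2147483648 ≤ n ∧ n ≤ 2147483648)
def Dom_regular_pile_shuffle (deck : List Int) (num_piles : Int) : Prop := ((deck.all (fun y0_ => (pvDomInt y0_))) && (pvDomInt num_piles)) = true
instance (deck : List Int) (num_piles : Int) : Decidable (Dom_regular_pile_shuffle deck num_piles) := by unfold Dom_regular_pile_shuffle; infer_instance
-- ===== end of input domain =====

-- B gathers each pile with a strided index walk instead of A's deal-then-concatenate; same cost, return values proved equal on Pre_.

-- ===== PORT A =====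
-- piles[i % num_piles].append(card), modelled as read-modify-write at that index
def dealStep (num_piles : Int) (ps : List (List Int)) (p : Int × Int) : List (List Int) :=
  PySem.List.pySetD ps (PySem.Int.mod p.1 num_piles)
    (PySem.List.pyGetD ps (PySem.Int.mod p.1 num_piles) [] ++ [p.2])

def regular_pile_shuffle (deck : List Int) (num_piles : Int) : List Int :=
  -- piles = []; for _ in range(num_piles): piles.append([])
  let piles : List (List Int) :=
    (PySem.List.pyRange 0 num_piles 1).foldl (fun ps _ => ps ++ [([] : List Int)]) []
  -- for i, card in enumerate(deck): piles[i % num_piles].append(card)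
  let piles := (PySem.List.enumerate deck 0).foldl (dealStep num_piles) piles
  -- out = []; for pile in piles: out += pile
  piles.foldl (fun out pile => out ++ pile) []

-- ===== PORT B =====
-- the while loop 'i = j; while i < len(deck): out.append(deck[i]); i += num_piles', with fuel
-- bounding the iteration count: the loop is only reached for j ∈ range(num_piles), i.e. num_piles ≥ 1,
-- and then it runs at most len(deck) times, so fuel = len(deck) + 1 is never exhausted there (exact).
def gatherLoop (deck : List Int) (num_piles : Int) : Nat → Int → List Int → List Int
  | 0, _, out => out
  | fuel + 1, i, out =>
    if i < (deck.length : Int) then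
      gatherLoop deck num_piles fuel (i + num_piles) (out ++ [PySem.List.pyGetD deck i 0])
    else out

def regular_pile_shuffle_alt (deck : List Int) (num_piles : Int) : List Int :=
  -- out = []; for j in range(num_piles): <while loop above>
  (PySem.List.pyRange 0 num_piles 1).foldl
    (fun out j => gatherLoop deck num_piles (deck.length + 1) j out) []

-- ===== PRECONDITION & SPEC =====
-- Pre_ excludes exactly the raising inputs: with a non-empty deck, num_piles = 0 raises
-- ZeroDivisionError at 'i % num_piles' and num_piles < 0 raises IndexError (piles is empty).
def Pre_regular_pile_shuffle (deck : List Int) (num_piles : Int) : Prop :=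
  1 ≤ num_piles ∨ deck = []
instance (deck : List Int) (num_piles : Int) : Decidable (Pre_regular_pile_shuffle deck num_piles) := by
  unfold Pre_regular_pile_shuffle; infer_instance

def pvWitness_regular_pile_shuffle : List Int × Int := ([3, 1, 4, 1, 5, 9, 2], 3)

def Spec_regular_pile_shuffle (deck : List Int) (num_piles : Int) (out : List Int) : Prop := out = regular_pile_shuffle_alt deck num_piles
instance (deck : List Int) (num_piles : Int) (out : List Int) : Decidable (Spec_regular_pile_shuffle deck num_piles out) := by unfold Spec_regular_pile_shuffle; infer_instance

-- ===== CLAIM (what is proved, stated in full; the proofs are below) =====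
def Claim_equal_regular_pile_shuffle : Prop := ∀ (deck : List Int) (num_piles : Int), Dom_regular_pile_shuffle deck num_piles → Pre_regular_pile_shuffle deck num_piles → Spec_regular_pile_shuffle deck num_piles (regular_pile_shuffle deck num_piles)
-- ===== LEMMAS AND PROOFS =====

-- the common spec: every num_piles-th element of a list, starting at its head
def pickStride (N : Nat) : List Int → List Int
  | [] => []
  | c :: cs => c :: pickStride N (cs.drop (N - 1))
termination_by l => l.length
decreasing_by simp

lemma emod_sub_one_zero (a n : Int) (hn : 0 < n) (h : a % n = 0) : (a - 1) % n = n - 1 := by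
  have hd := Int.mul_ediv_add_emod a n
  have h2 : a - 1 = (n - 1) + n * (a / n - 1) := by rw [mul_sub, mul_one]; omega
  rw [h2, Int.add_mul_emod_self_left, Int.emod_eq_of_lt (by omega) (by omega)]

lemma emod_sub_one_pos (a n : Int) (hn : 0 < n) (h : 1 ≤ a % n) : (a - 1) % n = a % n - 1 := by
  have hd := Int.mul_ediv_add_emod a n
  have hlt : a % n < n := Int.emod_lt_of_pos a hn
  have h2 : a - 1 = (a % n - 1) + n * (a / n) := by omega
  rw [h2, Int.add_mul_emod_self_left, Int.emod_eq_of_lt (by omega) (by omega)]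

lemma emod_self_sub (s n : Int) (_hn : 0 < n) : (s % n - s) % n = 0 := by
  have hd := Int.mul_ediv_add_emod s n
  have h2 : s % n - s = n * (-(s / n)) := by rw [mul_neg]; omega
  rw [h2, Int.mul_emod_right]

-- the deal fold preserves the number of piles
lemma deal_length (n : Int) (deck : List Int) : ∀ (s : Int) (ps : List (List Int)),
    ((PySem.List.enumerate deck s).foldl (dealStep n) ps).length = ps.length := by
  induction deck with
  | nil => intro s ps; simp [PySem.List.enumerate_nil]
  | cons c cs ih =>
      intro s ps
      rw [PySem.List.enumerate_cons, List.foldl_cons, ih]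
      simp [dealStep]

-- after dealing `deck` whose first card has running index s, pile j holds its old content
-- followed by every n-th card of deck starting at offset (j - s) mod n
lemma deal_getD (n : Int) (hn : 1 ≤ n) (deck : List Int) :
    ∀ (s : Int) (ps : List (List Int)), ps.length = n.toNat →
    ∀ j : Nat, j < n.toNat →
    ((PySem.List.enumerate deck s).foldl (dealStep n) ps).getD j []
      = ps.getD j [] ++ pickStride n.toNat (deck.drop ((((j : Int) - s) % n).toNat)) := by
  have hn0 : (0 : Int) < n := by omega
  induction deck with
  | nil => intro s ps hlen j hj; simp [PySem.List.enumerate_nil, pickStride]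
  | cons c cs ih =>
      intro s ps hlen j hj
      have hm0 : 0 ≤ PySem.Int.mod s n := PySem.Int.mod_nonneg s hn0
      have hmlt : PySem.Int.mod s n < n := PySem.Int.mod_lt s hn0
      have hmn : (PySem.Int.mod s n).toNat < ps.length := by omega
      have hstep : dealStep n ps (s, c)
          = ps.set (PySem.Int.mod s n).toNat (ps.getD (PySem.Int.mod s n).toNat [] ++ [c]) := by
        unfold dealStep
        rw [PySem.List.pySetD_of_nonneg _ _ hm0,
            PySem.List.pyGetD_eq_getElem _ _ hm0 (by omega),
            List.getD_eq_getElem _ _ hmn]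
      rw [PySem.List.enumerate_cons, List.foldl_cons, hstep,
          ih (s + 1) _ (by simpa using hlen) j hj]
      have hmod : PySem.Int.mod s n = s % n := PySem.Int.mod_eq_emod_of_pos hn0
      by_cases hjm : j = (PySem.Int.mod s n).toNat
      · -- this card lands on pile j
        have hji : (j : Int) = s % n := by omega
        have h0 : ((j : Int) - s) % n = 0 := by rw [hji]; exact emod_self_sub s n hn0
        have h1 : ((j : Int) - (s + 1)) % n = n - 1 := by
          have := emod_sub_one_zero ((j : Int) - s) n hn0 h0
          rw [← this]; ring_nf
        rw [h0, h1]
        have hset : (ps.set (PySem.Int.mod s n).toNat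
              (ps.getD (PySem.Int.mod s n).toNat [] ++ [c])).getD j []
            = ps.getD j [] ++ [c] := by
          subst hjm
          simp [List.getD_eq_getElem?_getD, hmn]
        rw [hset]
        simp [pickStride, List.append_assoc]
      · -- another pile: content unchanged, offset shrinks by one
        have hset : (ps.set (PySem.Int.mod s n).toNat
              (ps.getD (PySem.Int.mod s n).toNat [] ++ [c])).getD j []
            = ps.getD j [] := by
          simp [List.getD_eq_getElem?_getD, List.getElem?_set_ne (by omega : (PySem.Int.mod s n).toNat ≠ j)]
        rw [hset]
        have hr0 : 0 ≤ ((j : Int) - s) % n := Int.emod_nonneg _ (by omega)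
        have hrne : ((j : Int) - s) % n ≠ 0 := by
          intro h0
          obtain ⟨t, ht⟩ := Int.dvd_of_emod_eq_zero h0
          have hjeq : (j : Int) % n = s % n := by
            have : (j : Int) = s + n * t := by omega
            rw [this, Int.add_mul_emod_self_left]
          have : (j : Int) % n = (j : Int) := Int.emod_eq_of_lt (by omega) (by exact_mod_cast by omega)
          omega
        have hrlt : ((j : Int) - s) % n < n := Int.emod_lt_of_pos _ hn0
        have h1 : ((j : Int) - (s + 1)) % n = ((j : Int) - s) % n - 1 := by
          have := emod_sub_one_pos ((j : Int) - s) n hn0 (by omega)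
          rw [← this]; ring_nf
        rw [h1]
        have hdrop : (c :: cs).drop ((((j : Int) - s) % n).toNat)
            = cs.drop ((((j : Int) - s) % n - 1).toNat) := by
          have hh : (((j : Int) - s) % n).toNat = (((j : Int) - s) % n - 1).toNat + 1 := by omega
          rw [hh, List.drop_succ_cons]
        rw [hdrop]

-- the while loop gathers every n-th element of deck starting at index i
lemma gatherLoop_eq (deck : List Int) (n : Int) (hn : 1 ≤ n) :
    ∀ (fuel : Nat) (i : Int) (out : List Int), 0 ≤ i → (deck.length : Int) - i ≤ fuel →
    gatherLoop deck n fuel i out = out ++ pickStride n.toNat (deck.drop i.toNat) := by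
  intro fuel
  induction fuel with
  | zero =>
      intro i out hi hf
      have : deck.drop i.toNat = [] := List.drop_eq_nil_of_le (by omega)
      simp [gatherLoop, this, pickStride]
  | succ fuel ih =>
      intro i out hi hf
      rw [gatherLoop]
      by_cases h : i < (deck.length : Int)
      · have hlt : i.toNat < deck.length := by omega
        rw [if_pos h, ih (i + n) _ (by omega) (by omega)]
        have hdrop : deck.drop i.toNat = deck[i.toNat] :: deck.drop (i.toNat + 1) :=
          List.drop_eq_getElem_cons hlt
        have hdrop2 : (deck.drop (i.toNat + 1)).drop (n.toNat - 1) = deck.drop ((i + n).toNat) := by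
          rw [List.drop_drop]
          congr 1
          omega
        rw [PySem.List.pyGetD_eq_getElem _ _ hi h]
        conv_rhs => rw [hdrop]
        rw [pickStride, hdrop2]
        simp
      · rw [if_neg h]
        have : deck.drop i.toNat = [] := List.drop_eq_nil_of_le (by omega)
        simp [this, pickStride]

theorem regular_pile_shuffle_spec : Claim_equal_regular_pile_shuffle := by
  intro deck n _ hpre
  unfold Spec_regular_pile_shuffle regular_pile_shuffle regular_pile_shuffle_alt
  by_cases hn : 1 ≤ n
  · -- main case: at least one pile
    have hn0 : (0 : Int) < n := by omega
    -- initial piles = n.toNat empty lists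
    have hinit : (PySem.List.pyRange 0 n 1).foldl
        (fun ps _ => ps ++ [([] : List Int)]) [] = List.replicate n.toNat [] := by
      rw [show (fun (ps : List (List Int)) (_ : Int) => ps ++ [([] : List Int)])
            = (fun ps x => ps ++ [(fun _ => ([] : List Int)) x]) from rfl,
          PySem.List.foldl_append_singleton_eq_map, List.map_const']
      simp [PySem.List.length_pyRange_one]
    rw [hinit]
    -- the final piles, elementwise
    have hlen : ((PySem.List.enumerate deck 0).foldl (dealStep n)
        (List.replicate n.toNat [])).length = n.toNat := by
      rw [deal_length]; simp
    have hget : ∀ j : Nat, j < n.toNat →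
        ((PySem.List.enumerate deck 0).foldl (dealStep n) (List.replicate n.toNat [])).getD j []
          = pickStride n.toNat (deck.drop j) := by
      intro j hj
      rw [deal_getD n hn deck 0 _ (by simp) j hj]
      have : ((j : Int) - 0) % n = (j : Int) := by
        rw [sub_zero]; exact Int.emod_eq_of_lt (by omega) (by omega)
      rw [this]
      simp
    have hpiles_eq : (PySem.List.enumerate deck 0).foldl (dealStep n) (List.replicate n.toNat [])
        = (List.range n.toNat).map (fun j => pickStride n.toNat (deck.drop j)) := by
      apply List.ext_getElem
      · simp [hlen]
      · intro j h1 h2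
        have hj : j < n.toNat := by simpa [hlen] using h1
        have := hget j hj
        rw [List.getD_eq_getElem _ _ h1] at this
        simp [this]
    -- A's final concatenation is the flatten of the piles
    rw [show (fun (out pile : List Int) => out ++ pile)
          = (fun out pile => out ++ (fun x : List Int => x) pile) from rfl,
        PySem.List.foldl_append_eq_flatMap, hpiles_eq]
    -- B's fold is the flatMap of the strided walks
    rw [PySem.List.foldl_congr_mem (PySem.List.pyRange 0 n 1) _
          (fun out j => out ++ pickStride n.toNat (deck.drop j.toNat)) []
          (by
            intro acc x hx
            rw [PySem.List.mem_pyRange_one] at hx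
            exact gatherLoop_eq deck n hn (deck.length + 1) x acc hx.1 (by omega)),
        PySem.List.foldl_append_eq_flatMap]
    rw [PySem.List.pyRange_one]
    simp [List.flatMap_map, sub_zero]
  · -- no piles: Pre_ forces deck = []
    have hdeck : deck = [] := by
      rcases hpre with h | h
      · omega
      · exact h
    subst hdeck
    rw [PySem.List.pyRange_one_eq_nil (by omega)]
    simp [PySem.List.enumerate_nil]
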